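-- pv_equiv track=rewrite | github.com/innawendell/European_Comedy | player/text_processing/text_processing_functions.py | remove_start_end_stage_directions
-- ===== SOURCE A (Python) =====
-- def remove_start_end_stage_directions(verse_line):
--     """
--     The function removes stage directions at the beginning and end of a verse line as they should not be
--     counted as stage direction splitting verse lines.
--     Params:
--         verse_line - string with the verse line with all stage directions marked as STAGE.
--     Returns:
--         verse_line - without stage directions at the beginning and end.
--     """
--     verse_line = verse_line.strip()
--     while verse_line[:5]=='STAGE' or verse_line[-5:]=='STAGE':
--         if verse_line[-5:]=='STAGE':
--             verse_line = verse_line[:-5].strip()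
--         elif verse_line[:5]=='STAGE':
--             verse_line = verse_line[5:].strip()
--
--     return verse_line
-- ===== SOURCE B (Python) =====
-- def remove_start_end_stage_directions(verse_line):
--     """Single two-pointer pass over the stripped line: move hi back over trailing
--     'STAGE' tokens (and whitespace), then lo forward over leading ones; one final slice."""
--     s = verse_line.strip()
--     lo, hi = 0, len(s)
--     while hi - lo >= 5 and s[hi-5:hi] == 'STAGE':
--         hi -= 5
--         while hi > lo and s[hi-1].isspace():
--             hi -= 1
--     while lo + 5 <= hi and s[lo:lo+5] == 'STAGE':
--         lo += 5
--         while lo < hi and s[lo].isspace():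
--             lo += 1
--     return s[lo:hi]
-- ===== Notes on version B (the rewrite author's own statement) =====
-- stated objective: alternative
-- what changed: Replaces A's repeated slice-and-restrip while loop (each iteration copies the string) with a single two-pointer index scan over the once-stripped string: hi walks back over trailing 'STAGE' tokens and whitespace, lo walks forward over leading ones, and one final slice is taken.
import Mathlib
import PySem

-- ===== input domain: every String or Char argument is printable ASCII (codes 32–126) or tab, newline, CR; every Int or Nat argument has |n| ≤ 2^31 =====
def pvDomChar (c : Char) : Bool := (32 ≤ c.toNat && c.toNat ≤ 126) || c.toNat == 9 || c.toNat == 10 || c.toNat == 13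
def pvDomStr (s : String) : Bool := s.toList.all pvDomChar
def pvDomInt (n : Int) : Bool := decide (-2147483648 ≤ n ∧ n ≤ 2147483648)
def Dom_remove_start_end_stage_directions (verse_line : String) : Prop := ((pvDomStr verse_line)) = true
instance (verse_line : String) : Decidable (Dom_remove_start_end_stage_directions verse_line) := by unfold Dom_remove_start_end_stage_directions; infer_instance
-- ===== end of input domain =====

-- B replaces A's repeated slice-and-restrip loop by a single two-pointer index scan (alternative decomposition, same results).

-- ===== PORT A =====
def pvSTAGE : List Char := ['S', 'T', 'A', 'G', 'E']

-- termination helper for the port: stripping never lengthens a string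
theorem pvStripLen (l : List Char) : (PySem.Chars.strip l).length ≤ l.length := by
  simp only [PySem.Chars.strip, PySem.Chars.lstrip, PySem.Chars.rstrip, List.length_reverse]
  have h1 := List.length_dropWhile_le PySem.Chars.isspace (List.dropWhile PySem.Chars.isspace l).reverse
  have h2 := List.length_dropWhile_le PySem.Chars.isspace l
  simp only [List.length_reverse] at h1
  omega

-- `while line[:5]=='STAGE' or line[-5:]=='STAGE': if line[-5:]=='STAGE': line = line[:-5].strip() elif line[:5]=='STAGE': line = line[5:].strip()`
def pvALoop (l : List Char) : List Char :=
  if h1 : PySem.Chars.slice l none (some 5) = pvSTAGE ∨ PySem.Chars.slice l (some (-5)) none = pvSTAGE then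
    if h2 : PySem.Chars.slice l (some (-5)) none = pvSTAGE then
      pvALoop (PySem.Chars.strip (PySem.Chars.slice l none (some (-5))))
    else
      pvALoop (PySem.Chars.strip (PySem.Chars.slice l (some 5) none))
  else l
termination_by l.length
decreasing_by
  · have h2' : List.drop (l.length - 5) l = pvSTAGE := by
      rw [PySem.Chars.slice_eq_listSlice, PySem.List.slice_from_neg_ofNat l 5 (by norm_num)] at h2
      exact h2
    have hlen := congrArg List.length h2'
    simp [pvSTAGE] at hlen
    have hsl : PySem.Chars.slice l none (some (-5)) = List.take (l.length - 5) l := by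
      rw [PySem.Chars.slice_eq_listSlice, PySem.List.slice_to_neg_ofNat l 5 (by norm_num)]
    rw [hsl]
    have := pvStripLen (List.take (l.length - 5) l)
    simp only [List.length_take] at this
    omega
  · have hpre : PySem.Chars.slice l none (some 5) = pvSTAGE := h1.resolve_right h2
    have e5 : ((5:Int)).toNat = 5 := rfl
    have hpre' : List.take 5 l = pvSTAGE := by
      rw [PySem.Chars.slice_eq_listSlice, PySem.List.slice_to l (by norm_num : (0:Int) ≤ 5), e5] at hpre
      exact hpre
    have hlen := congrArg List.length hpre'
    simp [pvSTAGE] at hlen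
    have hsl : PySem.Chars.slice l (some 5) none = List.drop 5 l := by
      rw [PySem.Chars.slice_eq_listSlice, PySem.List.slice_from l (by norm_num : (0:Int) ≤ 5), e5]
    rw [hsl]
    have := pvStripLen (List.drop 5 l)
    simp only [List.length_drop] at this
    omega

def remove_start_end_stage_directions (verse_line : String) : String :=
  String.ofList (pvALoop (PySem.Chars.strip verse_line.toList))

-- ===== PORT B =====
-- `while hi > lo and s[hi-1].isspace(): hi -= 1`
def pvSkipWsBack (s : List Char) (lo hi : Nat) : Nat :=
  if lo < hi ∧ PySem.Chars.isspace (s.getD (hi - 1) ' ') then pvSkipWsBack s lo (hi - 1) else hi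
termination_by hi

-- termination helper for pvHiLoop
theorem pvSkipWsBack_le (s : List Char) (lo hi : Nat) : pvSkipWsBack s lo hi ≤ hi := by
  fun_induction pvSkipWsBack s lo hi <;> omega

-- `while hi - lo >= 5 and s[hi-5:hi] == 'STAGE': hi -= 5; <skip trailing whitespace>`
def pvHiLoop (s : List Char) (lo hi : Nat) : Nat :=
  if _h : lo + 5 ≤ hi ∧ PySem.Chars.slice s (some ((hi : Int) - 5)) (some (hi : Int)) = pvSTAGE then
    pvHiLoop s lo (pvSkipWsBack s lo (hi - 5))
  else hi
termination_by hi
decreasing_by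
  have := pvSkipWsBack_le s lo (hi - 5); omega

-- `while lo < hi and s[lo].isspace(): lo += 1`
def pvSkipWsFwd (s : List Char) (lo hi : Nat) : Nat :=
  if lo < hi ∧ PySem.Chars.isspace (s.getD lo ' ') then pvSkipWsFwd s (lo + 1) hi else lo
termination_by hi - lo

-- termination helper for pvLoLoop
theorem pvSkipWsFwd_ge (s : List Char) (lo hi : Nat) : lo ≤ pvSkipWsFwd s lo hi := by
  fun_induction pvSkipWsFwd s lo hi <;> omega

-- `while lo + 5 <= hi and s[lo:lo+5] == 'STAGE': lo += 5; <skip leading whitespace>`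
def pvLoLoop (s : List Char) (lo hi : Nat) : Nat :=
  if _h : lo + 5 ≤ hi ∧ PySem.Chars.slice s (some (lo : Int)) (some ((lo : Int) + 5)) = pvSTAGE then
    pvLoLoop s (pvSkipWsFwd s (lo + 5) hi) hi
  else lo
termination_by hi - lo
decreasing_by
  have := pvSkipWsFwd_ge s (lo + 5) hi; omega

def remove_start_end_stage_directions_alt (verse_line : String) : String :=
  let s := PySem.Chars.strip verse_line.toList
  let hi := pvHiLoop s 0 s.length
  let lo := pvLoLoop s 0 hi
  String.ofList (PySem.Chars.slice s (some (lo : Int)) (some (hi : Int)))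

-- ===== PRECONDITION & SPEC =====
def Spec_remove_start_end_stage_directions (verse_line : String) (out : String) : Prop := out = remove_start_end_stage_directions_alt verse_line
instance (verse_line : String) (out : String) : Decidable (Spec_remove_start_end_stage_directions verse_line out) := by unfold Spec_remove_start_end_stage_directions; infer_instance

-- ===== CLAIM (what is proved, stated in full; the proofs are below) =====
def Claim_equal_remove_start_end_stage_directions : Prop := ∀ (verse_line : String), Dom_remove_start_end_stage_directions verse_line → Spec_remove_start_end_stage_directions verse_line (remove_start_end_stage_directions verse_line)

-- ===== LEMMAS AND PROOFS =====

theorem pvDropWhileHead (p : Char → Bool) (d : Char) :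
    ∀ (l : List Char), l.dropWhile p ≠ [] → p ((l.dropWhile p).getD 0 d) = false := by
  intro l h
  induction l with
  | nil => simp at h
  | cons a l ih =>
    by_cases hp : p a = true
    · rw [List.dropWhile_cons_of_pos hp] at h ⊢; exact ih h
    · rw [List.dropWhile_cons_of_neg hp] at h ⊢
      simpa using hp

theorem pvPrefixHead (d : Char) {l₁ l₂ : List Char} (h : l₁ <+: l₂) (hne : l₁ ≠ []) :
    l₁.getD 0 d = l₂.getD 0 d := by
  obtain ⟨t, rfl⟩ := h
  cases l₁ with
  | nil => simp at hne
  | cons a l => simp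

theorem pvRstripPrefix (l : List Char) : PySem.Chars.rstrip l <+: l := by
  rw [← List.reverse_suffix]
  simpa [PySem.Chars.rstrip] using List.dropWhile_suffix (l := l.reverse) PySem.Chars.isspace

theorem pvStripHead (t : List Char) (h : PySem.Chars.strip t ≠ []) :
    PySem.Chars.isspace ((PySem.Chars.strip t).getD 0 ' ') = false := by
  have hdef : PySem.Chars.strip t = PySem.Chars.rstrip (PySem.Chars.lstrip t) := rfl
  have hpre := pvRstripPrefix (PySem.Chars.lstrip t)
  rw [hdef] at h ⊢
  have hlne : PySem.Chars.lstrip t ≠ [] := by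
    intro hnil; rw [hnil] at h; exact h rfl
  rw [pvPrefixHead ' ' hpre h]
  simp only [PySem.Chars.lstrip]
  exact pvDropWhileHead _ _ t hlne

theorem pvStripLast (t : List Char) (h : PySem.Chars.strip t ≠ []) :
    PySem.Chars.isspace ((PySem.Chars.strip t).getD ((PySem.Chars.strip t).length - 1) ' ') = false := by
  have hdef : PySem.Chars.strip t = PySem.Chars.rstrip (PySem.Chars.lstrip t) := rfl
  set u := PySem.Chars.lstrip t with hu
  set v := List.dropWhile PySem.Chars.isspace u.reverse with hv
  have hsv : PySem.Chars.strip t = v.reverse := by rw [hdef]; rfl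
  rw [hsv] at h ⊢
  have hvne : v ≠ [] := by intro hnil; exact h (by simp [hnil])
  have hlen : 0 < v.reverse.length := by simpa [List.length_pos_iff] using h
  rw [List.getD_eq_getElem _ _ (by omega)]
  have hlast : v.reverse[v.reverse.length - 1] = v.reverse.getLast (by simpa using hvne) := by
    rw [List.getLast_eq_getElem]
  rw [hlast]
  have : v.reverse.getLast (by simpa using hvne) = v.head hvne := by
    simpa [List.getLast?_reverse, List.head?_eq_head hvne] using
      (List.getLast?_eq_getLast (l := v.reverse) (by simpa using hvne)).symm
  rw [this]
  have := pvDropWhileHead PySem.Chars.isspace ' ' u.reverse (by rw [← hv]; exact hvne)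
  rw [← hv] at this
  rwa [List.getD_eq_getElem _ _ (by simpa [List.length_pos_iff] using hvne), ← List.head_eq_getElem] at this

theorem pvRstripNil : PySem.Chars.rstrip ([] : List Char) = [] := rfl

theorem pvRstripSnocT {c : Char} (l : List Char) (h : PySem.Chars.isspace c = true) :
    PySem.Chars.rstrip (l ++ [c]) = PySem.Chars.rstrip l := by
  simp [PySem.Chars.rstrip, List.dropWhile_cons_of_pos h]

theorem pvRstripSnocF {c : Char} (l : List Char) (h : PySem.Chars.isspace c = false) :
    PySem.Chars.rstrip (l ++ [c]) = l ++ [c] := by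
  have h' : ¬ (PySem.Chars.isspace c = true) := by simp [h]
  simp [PySem.Chars.rstrip, List.dropWhile_cons_of_neg h']

theorem pvLstripConsT {c : Char} (l : List Char) (h : PySem.Chars.isspace c = true) :
    PySem.Chars.lstrip (c :: l) = PySem.Chars.lstrip l := by
  simp [PySem.Chars.lstrip, List.dropWhile_cons_of_pos h]

theorem pvLstripConsF {c : Char} (l : List Char) (h : PySem.Chars.isspace c = false) :
    PySem.Chars.lstrip (c :: l) = c :: l := by
  have h' : ¬ (PySem.Chars.isspace c = true) := by simp [h]
  simp [PySem.Chars.lstrip, List.dropWhile_cons_of_neg h']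

theorem pvLstripNil : PySem.Chars.lstrip ([] : List Char) = [] := rfl

theorem pvSegCons (s : List Char) (j hi : Nat) (hj : j < hi) (hhi : hi ≤ s.length) :
    (s.drop j).take (hi - j) = s.getD j ' ' :: (s.drop (j + 1)).take (hi - (j + 1)) := by
  have hjl : j < s.length := lt_of_lt_of_le hj hhi
  rw [List.drop_eq_getElem_cons hjl, List.getD_eq_getElem _ _ hjl]
  have h1 : hi - j = (hi - (j + 1)) + 1 := by omega
  rw [h1, List.take_succ_cons]

theorem pvSegSnoc (s : List Char) (j hi : Nat) (hj : j < hi) (hhi : hi ≤ s.length) :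
    (s.drop j).take (hi - j) = (s.drop j).take (hi - 1 - j) ++ [s.getD (hi - 1) ' '] := by
  have h1 : hi - j = (hi - 1 - j) + 1 := by omega
  rw [h1, List.take_succ]
  have h2 : (s.drop j)[hi - 1 - j]? = some s[hi - 1] := by
    rw [List.getElem?_drop]
    rw [List.getElem?_eq_getElem (by omega)]
    congr 1; congr 1; omega
  rw [h2, List.getD_eq_getElem _ _ (by omega)]
  rfl

theorem pvSegLen (s : List Char) (j hi : Nat) (hhi : hi ≤ s.length) :
    ((s.drop j).take (hi - j)).length = hi - j := by
  simp [List.length_take, List.length_drop]; omega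

theorem pvCondPre (s : List Char) (lo hi : Nat) (hhi : hi ≤ s.length) :
    PySem.Chars.slice ((s.drop lo).take (hi - lo)) none (some 5) = pvSTAGE ↔
      (lo + 5 ≤ hi ∧ (s.drop lo).take 5 = pvSTAGE) := by
  rw [PySem.Chars.slice_eq_listSlice, PySem.List.slice_to _ (by norm_num : (0:Int) ≤ 5)]
  have ht : ((5:Int)).toNat = 5 := rfl
  rw [ht, List.take_take]
  constructor
  · intro h
    have hl := congrArg List.length h
    simp only [List.length_take, List.length_drop, pvSTAGE] at hl
    have h5 : lo + 5 ≤ hi := by simp at hl; omega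
    have hm : min 5 (hi - lo) = 5 := by omega
    rw [hm] at h
    exact ⟨h5, h⟩
  · intro ⟨h5, h⟩
    have hm : min 5 (hi - lo) = 5 := by omega
    rw [hm]; exact h

theorem pvCondSuf (s : List Char) (lo hi : Nat) (hhi : hi ≤ s.length) :
    PySem.Chars.slice ((s.drop lo).take (hi - lo)) (some (-5)) none = pvSTAGE ↔
      (lo + 5 ≤ hi ∧ (s.drop (hi - 5)).take 5 = pvSTAGE) := by
  rw [PySem.Chars.slice_eq_listSlice, PySem.List.slice_from_neg_ofNat _ 5 (by norm_num),
    pvSegLen s lo hi hhi, List.drop_take, List.drop_drop]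
  by_cases h5 : lo + 5 ≤ hi
  · have e1 : hi - lo - (hi - lo - 5) = 5 := by omega
    have e2 : lo + (hi - lo - 5) = hi - 5 := by omega
    rw [e1, e2]
    simp [h5]
  · have e1 : hi - lo - 5 = 0 := by omega
    rw [e1]
    constructor
    · intro h
      have hl := congrArg List.length h
      simp only [List.length_take, List.length_drop, pvSTAGE] at hl
      simp at hl; omega
    · intro ⟨h, _⟩; omega

theorem pvHiGuard (s : List Char) (hi : Nat) (h5 : 5 ≤ hi) :
    PySem.Chars.slice s (some ((hi : Int) - 5)) (some (hi : Int)) = (s.drop (hi - 5)).take 5 := by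
  have e : (hi : Int) - 5 = ((hi - 5 : Nat) : Int) := by omega
  rw [PySem.Chars.slice_eq_listSlice, e, PySem.List.slice_natCast]
  congr 1; omega

theorem pvLoGuard (s : List Char) (lo : Nat) :
    PySem.Chars.slice s (some (lo : Int)) (some ((lo : Int) + 5)) = (s.drop lo).take 5 := by
  have e : (lo : Int) + 5 = ((lo + 5 : Nat) : Int) := by omega
  rw [PySem.Chars.slice_eq_listSlice, e, PySem.List.slice_natCast]
  congr 1; omega

theorem pvSkipWsFwd_le (s : List Char) (lo hi : Nat) (h : lo ≤ hi) : pvSkipWsFwd s lo hi ≤ hi := by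
  revert h
  fun_induction pvSkipWsFwd s lo hi <;> omega

theorem pvSkipWsFwd_post (s : List Char) (lo hi : Nat) :
    pvSkipWsFwd s lo hi < hi → PySem.Chars.isspace (s.getD (pvSkipWsFwd s lo hi) ' ') = false := by
  fun_induction pvSkipWsFwd s lo hi with
  | case1 lo h ih => exact ih
  | case2 lo h =>
    intro hlt
    rcases Bool.eq_false_or_eq_true (PySem.Chars.isspace (s.getD lo ' ')) with hb | hb
    · exact absurd ⟨hlt, hb⟩ h
    · exact hb

theorem pvSkipWsBack_post (s : List Char) (lo hi : Nat) :
    lo < pvSkipWsBack s lo hi → PySem.Chars.isspace (s.getD (pvSkipWsBack s lo hi - 1) ' ') = false := by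
  fun_induction pvSkipWsBack s lo hi with
  | case1 hi h ih => exact ih
  | case2 hi h =>
    intro hlt
    rcases Bool.eq_false_or_eq_true (PySem.Chars.isspace (s.getD (hi - 1) ' ')) with hb | hb
    · exact absurd ⟨hlt, hb⟩ h
    · exact hb

theorem pvLstripSeg (s : List Char) (j hi : Nat) (hhi : hi ≤ s.length) (hj : j ≤ hi) :
    PySem.Chars.lstrip ((s.drop j).take (hi - j)) =
      (s.drop (pvSkipWsFwd s j hi)).take (hi - pvSkipWsFwd s j hi) := by
  revert hj
  fun_induction pvSkipWsFwd s j hi with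
  | case1 j h ih =>
    intro hj
    rw [pvSegCons s j hi h.1 hhi, pvLstripConsT _ h.2]
    exact ih (by omega)
  | case2 j h =>
    intro hj
    by_cases hjh : j < hi
    · have hws : PySem.Chars.isspace (s.getD j ' ') = false := by
        rcases Bool.eq_false_or_eq_true (PySem.Chars.isspace (s.getD j ' ')) with hb | hb
        · exact absurd ⟨hjh, hb⟩ h
        · exact hb
      rw [pvSegCons s j hi hjh hhi, pvLstripConsF _ hws, ← pvSegCons s j hi hjh hhi]
    · have : hi - j = 0 := by omega
      rw [this]
      simp [pvLstripNil]

theorem pvRstripTake (s : List Char) (h : Nat) (hh : h ≤ s.length) :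
    PySem.Chars.rstrip (s.take h) = s.take (pvSkipWsBack s 0 h) := by
  fun_induction pvSkipWsBack s 0 h with
  | case1 h hg ih =>
    have hsnoc : s.take h = s.take (h - 1) ++ [s.getD (h - 1) ' '] := by
      have := pvSegSnoc s 0 h hg.1 hh
      simpa using this
    rw [hsnoc, pvRstripSnocT _ hg.2]
    exact ih (by omega)
  | case2 h hg =>
    by_cases h0 : 0 < h
    · have hws : PySem.Chars.isspace (s.getD (h - 1) ' ') = false := by
        rcases Bool.eq_false_or_eq_true (PySem.Chars.isspace (s.getD (h - 1) ' ')) with hb | hb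
        · exact absurd ⟨h0, hb⟩ hg
        · exact hb
      have hsnoc : s.take h = s.take (h - 1) ++ [s.getD (h - 1) ' '] := by
        have := pvSegSnoc s 0 h h0 hh
        simpa using this
      rw [hsnoc, pvRstripSnocF _ hws, ← hsnoc]
    · have : h = 0 := by omega
      simp [this, pvRstripNil]

theorem pvRstripSegId (s : List Char) (lo hi : Nat) (hlo : lo < hi) (hhi : hi ≤ s.length)
    (hws : PySem.Chars.isspace (s.getD (hi - 1) ' ') = false) :
    PySem.Chars.rstrip ((s.drop lo).take (hi - lo)) = (s.drop lo).take (hi - lo) := by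
  rw [pvSegSnoc s lo hi hlo hhi, pvRstripSnocF _ hws, ← pvSegSnoc s lo hi hlo hhi]

theorem pvPhase2Stop (s : List Char) (lo hi : Nat) (hlo : lo ≤ hi) (hhi : hi ≤ s.length)
    (hnosuf : ¬(lo + 5 ≤ hi ∧ (s.drop (hi - 5)).take 5 = pvSTAGE))
    (hnopre : ¬(lo + 5 ≤ hi ∧ (s.drop lo).take 5 = pvSTAGE)) :
    pvALoop ((s.drop lo).take (hi - lo)) = (s.drop (pvLoLoop s lo hi)).take (hi - pvLoLoop s lo hi) := by
  have hnoA : ¬ PySem.Chars.slice ((s.drop lo).take (hi - lo)) none (some 5) = pvSTAGE :=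
    fun hA => hnopre ((pvCondPre s lo hi hhi).mp hA)
  have hnoB : ¬ PySem.Chars.slice ((s.drop lo).take (hi - lo)) (some (-5)) none = pvSTAGE :=
    fun hB => hnosuf ((pvCondSuf s lo hi hhi).mp hB)
  rw [pvALoop.eq_def, dif_neg (fun h => h.elim hnoA hnoB)]
  rw [pvLoLoop.eq_def, dif_neg (by
    rintro ⟨ha, hb⟩
    rw [pvLoGuard] at hb
    exact hnopre ⟨ha, hb⟩)]

theorem pvPhase2 (s : List Char) (hi : Nat) (hhi : hi ≤ s.length) :
    ∀ n lo, hi - lo ≤ n → lo ≤ hi →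
      (lo < hi → PySem.Chars.isspace (s.getD lo ' ') = false) →
      (lo < hi → PySem.Chars.isspace (s.getD (hi - 1) ' ') = false) →
      ¬(lo + 5 ≤ hi ∧ (s.drop (hi - 5)).take 5 = pvSTAGE) →
      pvALoop ((s.drop lo).take (hi - lo)) = (s.drop (pvLoLoop s lo hi)).take (hi - pvLoLoop s lo hi) := by
  intro n
  induction n with
  | zero =>
    intro lo hn hlo hhead hlast hnosuf
    exact pvPhase2Stop s lo hi hlo hhi hnosuf (by rintro ⟨h5, _⟩; omega)
  | succ n ih =>
    intro lo hn hlo hhead hlast hnosuf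
    by_cases hpre : lo + 5 ≤ hi ∧ (s.drop lo).take 5 = pvSTAGE
    · rw [pvALoop.eq_def]
      rw [dif_pos (Or.inl ((pvCondPre s lo hi hhi).mpr hpre))]
      rw [dif_neg (fun hB => hnosuf ((pvCondSuf s lo hi hhi).mp hB))]
      have e5 : ((5:Int)).toNat = 5 := rfl
      have hseg5 : PySem.Chars.slice ((s.drop lo).take (hi - lo)) (some 5) none =
          (s.drop (lo + 5)).take (hi - (lo + 5)) := by
        rw [PySem.Chars.slice_eq_listSlice, PySem.List.slice_from _ (by norm_num : (0:Int) ≤ 5), e5,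
          List.drop_take, List.drop_drop]
        have e1 : hi - lo - 5 = hi - (lo + 5) := by omega
        rw [e1]
      rw [hseg5]
      have hstrip : PySem.Chars.strip ((s.drop (lo + 5)).take (hi - (lo + 5))) =
          (s.drop (pvSkipWsFwd s (lo + 5) hi)).take (hi - pvSkipWsFwd s (lo + 5) hi) := by
        show PySem.Chars.rstrip (PySem.Chars.lstrip _) = _
        rw [pvLstripSeg s (lo + 5) hi hhi (by omega)]
        by_cases hlt : pvSkipWsFwd s (lo + 5) hi < hi
        · exact pvRstripSegId s _ hi hlt hhi (hlast (by omega))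
        · have hle := pvSkipWsFwd_le s (lo + 5) hi (by omega)
          have hz : hi - pvSkipWsFwd s (lo + 5) hi = 0 := by omega
          rw [hz]
          simp [pvRstripNil]
      rw [hstrip]
      rw [pvLoLoop.eq_def, dif_pos ⟨hpre.1, by rw [pvLoGuard]; exact hpre.2⟩]
      exact ih (pvSkipWsFwd s (lo + 5) hi)
        (by have := pvSkipWsFwd_ge s (lo + 5) hi; omega)
        (pvSkipWsFwd_le s (lo + 5) hi (by omega))
        (pvSkipWsFwd_post s (lo + 5) hi)
        (fun h => hlast (by omega))
        (by rintro ⟨_, hx⟩; exact hnosuf ⟨hpre.1, hx⟩)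
    · exact pvPhase2Stop s lo hi hlo hhi hnosuf hpre

theorem pvPhase1Stop (s : List Char) (hhead : ∀ _ : s ≠ [], PySem.Chars.isspace (s.getD 0 ' ') = false)
    (hi : Nat) (hhi : hi ≤ s.length)
    (hlast : 0 < hi → PySem.Chars.isspace (s.getD (hi - 1) ' ') = false)
    (hsuf : ¬(5 ≤ hi ∧ (s.drop (hi - 5)).take 5 = pvSTAGE)) :
    pvALoop (s.take hi) =
      (s.drop (pvLoLoop s 0 (pvHiLoop s 0 hi))).take (pvHiLoop s 0 hi - pvLoLoop s 0 (pvHiLoop s 0 hi)) := by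
  have hH : pvHiLoop s 0 hi = hi := by
    rw [pvHiLoop.eq_def]
    apply dif_neg
    rintro ⟨h1, h2⟩
    rw [pvHiGuard s hi (by omega)] at h2
    exact hsuf ⟨by omega, h2⟩
  rw [hH]
  have h2 := pvPhase2 s hi hhi hi 0 (by omega) (by omega)
    (fun hpos => hhead (List.ne_nil_of_length_pos (by omega)))
    (fun hpos => hlast hpos)
    (by rintro ⟨h5, hx⟩; exact hsuf ⟨by omega, hx⟩)
  simpa using h2

theorem pvPhase1 (s : List Char) (hhead : ∀ _ : s ≠ [], PySem.Chars.isspace (s.getD 0 ' ') = false) :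
    ∀ n hi, hi ≤ n → hi ≤ s.length →
      (0 < hi → PySem.Chars.isspace (s.getD (hi - 1) ' ') = false) →
      pvALoop (s.take hi) =
        (s.drop (pvLoLoop s 0 (pvHiLoop s 0 hi))).take (pvHiLoop s 0 hi - pvLoLoop s 0 (pvHiLoop s 0 hi)) := by
  intro n
  induction n with
  | zero =>
    intro hi hn hhi hlast
    have h0 : hi = 0 := by omega
    subst h0
    exact pvPhase1Stop s hhead 0 hhi hlast (by rintro ⟨h5, _⟩; omega)
  | succ n ih =>
    intro hi hn hhi hlast
    by_cases hsuf : 5 ≤ hi ∧ (s.drop (hi - 5)).take 5 = pvSTAGE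
    · have hsegeq : s.take hi = (s.drop 0).take (hi - 0) := by simp
      rw [pvALoop.eq_def]
      have hB : PySem.Chars.slice (s.take hi) (some (-5)) none = pvSTAGE := by
        rw [hsegeq]; exact (pvCondSuf s 0 hi hhi).mpr ⟨by omega, hsuf.2⟩
      rw [dif_pos (Or.inr hB), dif_pos hB]
      have hlth : (s.take hi).length = hi := by simp; omega
      have hsl : PySem.Chars.slice (s.take hi) none (some (-5)) = s.take (hi - 5) := by
        rw [PySem.Chars.slice_eq_listSlice, PySem.List.slice_to_neg_ofNat _ 5 (by norm_num), hlth,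
          List.take_take]
        congr 1; omega
      rw [hsl]
      have hlstrip : PySem.Chars.lstrip (s.take (hi - 5)) = s.take (hi - 5) := by
        by_cases h05 : 0 < hi - 5
        · have hne : s ≠ [] := by
            intro he; rw [he] at hhi; simp at hhi; omega
          have hcons : s.take (hi - 5) = s.getD 0 ' ' :: (s.drop 1).take (hi - 5 - 1) := by
            have := pvSegCons s 0 (hi - 5) h05 (by omega)
            simpa using this
          rw [hcons, pvLstripConsF _ (hhead hne), ← hcons]
        · have hz : hi - 5 = 0 := by omega
          simp [hz, pvLstripNil]
      have hstrip : PySem.Chars.strip (s.take (hi - 5)) = s.take (pvSkipWsBack s 0 (hi - 5)) := by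
        show PySem.Chars.rstrip (PySem.Chars.lstrip _) = _
        rw [hlstrip]
        exact pvRstripTake s (hi - 5) (by omega)
      rw [hstrip]
      have hHi : pvHiLoop s 0 hi = pvHiLoop s 0 (pvSkipWsBack s 0 (hi - 5)) := by
        conv_lhs => rw [pvHiLoop.eq_def]
        rw [dif_pos ⟨by omega, by rw [pvHiGuard s hi (by omega)]; exact hsuf.2⟩]
      rw [hHi]
      exact ih (pvSkipWsBack s 0 (hi - 5))
        (by have := pvSkipWsBack_le s 0 (hi - 5); omega)
        (by have := pvSkipWsBack_le s 0 (hi - 5); omega)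
        (pvSkipWsBack_post s 0 (hi - 5))
    · exact pvPhase1Stop s hhead hi hhi hlast hsuf

-- ===== VERDICT (by name: the statement is the Claim_ definition above) =====
theorem remove_start_end_stage_directions_spec : Claim_equal_remove_start_end_stage_directions := by
  intro v _
  unfold Spec_remove_start_end_stage_directions
  unfold remove_start_end_stage_directions remove_start_end_stage_directions_alt
  set s := PySem.Chars.strip v.toList with hs
  have hhead : ∀ _ : s ≠ [], PySem.Chars.isspace (s.getD 0 ' ') = false := fun h => pvStripHead v.toList h
  have hlast : 0 < s.length → PySem.Chars.isspace (s.getD (s.length - 1) ' ') = false := by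
    intro h
    exact pvStripLast v.toList (by rw [← hs] at *; exact List.length_pos_iff.mp h)
  have hmain := pvPhase1 s hhead s.length s.length le_rfl le_rfl hlast
  rw [List.take_length] at hmain
  show String.ofList (pvALoop s) =
    String.ofList (PySem.Chars.slice s (some ((pvLoLoop s 0 (pvHiLoop s 0 s.length) : Nat) : Int))
      (some ((pvHiLoop s 0 s.length : Nat) : Int)))
  rw [hmain, PySem.Chars.slice_eq_listSlice, PySem.List.slice_natCast]
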